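-- pv_equiv track=rewrite | github.com/cfmessias/passatempos | WOW.py | gerar_combinacoes_letras
-- ===== SOURCE A (Python) =====
-- import itertools
--
-- def gerar_combinacoes_letras(letras, tamanho=None):
--     """
--     Gera todas as combinações possíveis de letras.
--
--     Args:
--         letras (str): String contendo as letras a serem combinadas
--         tamanho (int, optional): Tamanho específico das combinações.
--                                 Se None, gera combinações de todos os tamanhos possíveis.
--
--     Returns:
--         list: Lista com todas as combinações possíveis
--     """
--     todas_combinacoes = []
--
--     if tamanho is not None:
--         # Gerar combinações de um tamanho específico
--         combinacoes = itertools.combinations(letras, tamanho)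
--         for combo in combinacoes:
--             todas_combinacoes.append(''.join(combo))
--     else:
--         # Gerar combinações de todos os tamanhos possíveis (de 1 até o número total de letras)
--         for i in range(1, len(letras) + 1):
--             combinacoes = itertools.combinations(letras, i)
--             for combo in combinacoes:
--                 todas_combinacoes.append(''.join(combo))
--
--     return todas_combinacoes
-- ===== SOURCE B (Python) =====
-- def gerar_combinacoes_letras(letras, tamanho=None):
--     """Hand-rolled recursive combination generator (no itertools)."""
--     def rec(rest, k, prefix):
--         if k == 0:
--             return [prefix]
--         if k < 0 or k > len(rest):
--             return []
--         out = []
--         for i in range(len(rest) - k + 1):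
--             out.extend(rec(rest[i + 1:], k - 1, prefix + rest[i]))
--         return out
--
--     if tamanho is not None:
--         return rec(letras, tamanho, '')
--     resultado = []
--     for size in range(1, len(letras) + 1):
--         resultado.extend(rec(letras, size, ''))
--     return resultado
-- ===== Notes on version B (the rewrite author's own statement) =====
-- stated objective: idiomatic
-- what changed: Replaces the itertools.combinations library calls by a self-contained recursive generator rec(rest, k, prefix) that picks each first letter in index order and recurses on the remaining suffix, producing the same lexicographic-by-position order.
import Mathlib
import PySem

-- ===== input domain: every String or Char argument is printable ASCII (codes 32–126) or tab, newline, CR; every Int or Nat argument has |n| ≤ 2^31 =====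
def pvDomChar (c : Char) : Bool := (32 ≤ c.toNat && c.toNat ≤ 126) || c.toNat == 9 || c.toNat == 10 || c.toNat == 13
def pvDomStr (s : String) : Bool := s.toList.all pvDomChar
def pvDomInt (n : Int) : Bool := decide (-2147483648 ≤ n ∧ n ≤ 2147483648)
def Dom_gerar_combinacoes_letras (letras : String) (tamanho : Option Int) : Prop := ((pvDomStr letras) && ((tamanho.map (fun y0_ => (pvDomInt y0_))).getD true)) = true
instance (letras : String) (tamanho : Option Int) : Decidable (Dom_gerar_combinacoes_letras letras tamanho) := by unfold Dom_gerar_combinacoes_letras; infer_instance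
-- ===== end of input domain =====

-- B replaces the itertools.combinations library calls by a hand-written recursive
-- generator (start-suffix recursion with a growing prefix); objective: idiomatic
-- self-contained code, same cost. Equality is proved on Pre_ (tamanho not a
-- negative integer; there A raises ValueError while B returns []).

-- ===== PORT A =====
-- itertools.combinations(pool, r) in its documented order (lexicographic by
-- positions), ported as the standard pick-or-skip recursion on the pool:
def combA : List Char → Nat → List (List Char)
  | _, 0 => [[]]
  | [], _ + 1 => []
  | x :: xs, k + 1 => (combA xs k).map (fun c => x :: c) ++ combA xs (k + 1)

def gerar_combinacoes_letras (letras : String) (tamanho : Option Int) : List String :=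
  match tamanho with
  | some t =>
      -- ''.join(combo) for each combo; Pre_ gives 0 ≤ t, so t.toNat is exact
      (combA letras.toList t.toNat).map (fun c => String.ofList c)
  | none =>
      (PySem.List.pyRange 1 ((letras.toList.length : Int) + 1) 1).foldl
        (fun acc i => acc ++ (combA letras.toList i.toNat).map (fun c => String.ofList c)) []

-- ===== PORT B =====
-- rec(rest, k, prefix) from Source B (strings as List Char, joined by String.ofList at the
-- top). The k < 0 test of Source B can only fire on the outermost call (recursion enters
-- with k - 1 ≥ 0), so it is done once in recB and the k ≥ 0 body recurses on a Nat:
def recBN : List Char → Nat → List Char → List (List Char)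
  | _, 0, pref => [pref]
  | rest, k + 1, pref =>
      if rest.length < k + 1 then []
      else (List.range (rest.length - (k + 1) + 1)).flatMap
            (fun i => recBN (rest.drop (i + 1)) k (pref ++ [rest.getD i ' ']))

def recB (rest : List Char) (k : Int) (pref : List Char) : List (List Char) :=
  if k < 0 then [] else recBN rest k.toNat pref

def gerar_combinacoes_letras_alt (letras : String) (tamanho : Option Int) : List String :=
  match tamanho with
  | some t => (recB letras.toList t []).map (fun c => String.ofList c)
  | none =>
      (PySem.List.pyRange 1 ((letras.toList.length : Int) + 1) 1).foldl
        (fun acc size => acc ++ (recB letras.toList size []).map (fun c => String.ofList c)) []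

-- ===== PRECONDITION & SPEC =====
-- Pre_ excludes tamanho = some t with t < 0: there itertools.combinations raises
-- ValueError (A returns nothing), while B naturally returns [].
def Pre_gerar_combinacoes_letras (letras : String) (tamanho : Option Int) : Prop :=
  0 ≤ tamanho.getD 0
instance (letras : String) (tamanho : Option Int) : Decidable (Pre_gerar_combinacoes_letras letras tamanho) := by unfold Pre_gerar_combinacoes_letras; infer_instance

def pvWitness_gerar_combinacoes_letras : String × Option Int := ("abc", some 2)


def Spec_gerar_combinacoes_letras (letras : String) (tamanho : Option Int) (out : List String) : Prop := out = gerar_combinacoes_letras_alt letras tamanho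
instance (letras : String) (tamanho : Option Int) (out : List String) : Decidable (Spec_gerar_combinacoes_letras letras tamanho out) := by unfold Spec_gerar_combinacoes_letras; infer_instance

-- ===== CLAIM (what is proved, stated in full; the proofs are below) =====
def Claim_equal_gerar_combinacoes_letras : Prop := ∀ (letras : String) (tamanho : Option Int), Dom_gerar_combinacoes_letras letras tamanho → Pre_gerar_combinacoes_letras letras tamanho → Spec_gerar_combinacoes_letras letras tamanho (gerar_combinacoes_letras letras tamanho)

-- ===== LEMMAS AND PROOFS =====

theorem combA_eq_nil (l : List Char) (k : Nat) (h : l.length < k) : combA l k = [] := by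
  induction l generalizing k with
  | nil => cases k with
    | zero => omega
    | succ m => simp [combA]
  | cons x xs ih =>
    cases k with
    | zero => simp at h
    | succ m =>
      simp only [List.length_cons] at h
      simp [combA, ih m (by omega), ih (m + 1) (by omega)]

theorem combA_flat (l : List Char) (k : Nat) (h : k + 1 ≤ l.length) :
    combA l (k + 1) = (List.range (l.length - (k + 1) + 1)).flatMap
      (fun i => (combA (l.drop (i + 1)) k).map (fun c => l.getD i ' ' :: c)) := by
  induction l with
  | nil => simp at h
  | cons x xs ih =>
    simp only [List.length_cons] at h ⊢
    have hr : xs.length + 1 - (k + 1) + 1 = (xs.length - k) + 1 := by omega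
    rw [hr, List.range_succ_eq_map, List.flatMap_cons, List.flatMap_map]
    have h0 : (fun i => (combA ((x :: xs).drop (i + 1)) k).map
        (fun c => (x :: xs).getD i ' ' :: c)) 0 = (combA xs k).map (fun c => x :: c) := by
      simp
    have htail : (List.range (xs.length - k)).flatMap
        ((fun i => (combA ((x :: xs).drop (i + 1)) k).map (fun c => (x :: xs).getD i ' ' :: c)) ∘ (· + 1))
        = combA xs (k + 1) := by
      by_cases hk : k + 1 ≤ xs.length
      · rw [ih hk]
        have : xs.length - (k + 1) + 1 = xs.length - k := by omega
        rw [this]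
        apply List.flatMap_congr  -- pointwise equality of the functions
        intro i _
        simp [Function.comp]
      · have : xs.length - k = 0 := by omega
        rw [this, combA_eq_nil xs (k + 1) (by omega)]
        simp
    simp only [combA, h0]
    congr 1
    rw [← htail]
    apply List.flatMap_congr
    intro a _
    simp [Function.comp, Nat.succ_eq_add_one]

theorem recBN_eq (m : Nat) (rest pref : List Char) :
    recBN rest m pref = (combA rest m).map (fun c => pref ++ c) := by
  induction m generalizing rest pref with
  | zero => simp [recBN, combA]
  | succ n ih =>
    rw [recBN]
    by_cases hlen : rest.length < n + 1
    · rw [if_pos hlen, combA_eq_nil rest (n + 1) hlen]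
      simp
    · rw [if_neg hlen]
      rw [combA_flat rest n (by omega), List.map_flatMap]
      apply List.flatMap_congr
      intro i _
      rw [ih]
      simp [List.map_map, Function.comp]

-- ===== VERDICT (by name: the statement is the Claim_ definition above) =====
theorem gerar_combinacoes_letras_spec : Claim_equal_gerar_combinacoes_letras := by
  intro letras tamanho _ hpre
  unfold Spec_gerar_combinacoes_letras
  cases tamanho with
  | some t =>
    simp only [Pre_gerar_combinacoes_letras, Option.getD_some] at hpre
    simp only [gerar_combinacoes_letras, gerar_combinacoes_letras_alt, recB,
      if_neg (by omega : ¬ t < 0), recBN_eq]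
    simp
  | none =>
    simp only [gerar_combinacoes_letras, gerar_combinacoes_letras_alt]
    apply PySem.List.foldl_congr_mem
    intro acc i hi
    have h1 : 1 ≤ i := (PySem.List.mem_pyRange_one.mp hi).1
    rw [recB, if_neg (by omega : ¬ i < 0), recBN_eq]
    simp
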